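-- pv_equiv track=rewrite | github.com/buyaoxiangtale/LabUtopia | roomlayout/12_17/extract_nav_goals_to_json.py | find_object_by_id
-- ===== SOURCE A (Python) =====
-- from typing import Dict, Optional, Tuple, List
--
-- def _norm(s: str) -> str:
--     """规范化字符串：去除下划线/空格/横线，转小写"""
--     if not s: return ""
--     return str(s).lower().replace(" ", "").replace("-", "").replace("_", "")
--
-- def find_object_by_id(obj_id: str, objects: list) -> Optional[dict]:
--     """在 objects 列表中查找指定 id 的对象"""
--     norm_id = _norm(obj_id)
--     # 精确匹配
--     for obj in objects:
--         if _norm(obj.get("id", "")) == norm_id: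
--             return obj
--     # 模糊匹配
--     for obj in objects:
--         real_id = _norm(obj.get("id", ""))
--         if real_id.startswith(norm_id) or norm_id.startswith(real_id):
--             return obj
--     return None
-- ===== SOURCE B (Python) =====
-- def _norm(s: str) -> str:
--     if not s: return ""
--     return str(s).lower().replace(" ", "").replace("-", "").replace("_", "")
--
-- def find_object_by_id(obj_id: str, objects: list):
--     """Single pass: return the first exact match immediately; remember the
--     first fuzzy candidate and return it (or None) after the loop."""
--     norm_id = _norm(obj_id)
--     fuzzy = None
--     for obj in objects:
--         real_id = _norm(obj.get("id", ""))
--         if real_id == norm_id: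
--             return obj
--         if fuzzy is None and (real_id.startswith(norm_id) or norm_id.startswith(real_id)):
--             fuzzy = obj
--     return fuzzy
-- ===== Notes on version B (the rewrite author's own statement) =====
-- stated objective: simpler
-- what changed: Replaces A's two separate scans (exact pass, then a second fuzzy pass re-normalizing every id) with a single pass that returns the first exact match immediately and remembers the first fuzzy candidate as a fallback.
import Mathlib
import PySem

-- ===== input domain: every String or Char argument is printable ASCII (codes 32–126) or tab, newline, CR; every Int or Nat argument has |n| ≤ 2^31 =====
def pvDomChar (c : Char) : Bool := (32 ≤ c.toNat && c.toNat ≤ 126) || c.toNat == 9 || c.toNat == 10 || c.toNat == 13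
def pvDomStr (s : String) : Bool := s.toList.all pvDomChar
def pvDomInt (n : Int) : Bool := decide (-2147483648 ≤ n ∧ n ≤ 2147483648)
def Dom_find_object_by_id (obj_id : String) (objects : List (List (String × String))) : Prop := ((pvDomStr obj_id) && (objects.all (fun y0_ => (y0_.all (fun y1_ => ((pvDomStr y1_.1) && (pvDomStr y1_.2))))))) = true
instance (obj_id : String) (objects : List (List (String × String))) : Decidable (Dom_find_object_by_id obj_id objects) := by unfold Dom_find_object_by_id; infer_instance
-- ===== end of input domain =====

-- B fuses A's two scans (exact, then fuzzy) into one pass that keeps the first fuzzy candidate as a fallback.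


-- ===== PORT A =====
-- _norm: lowercase, drop spaces, hyphens, underscores (exact via PySem.Str)
def pvNorm (s : String) : String :=
  if s = "" then ""
  else PySem.Str.replace (PySem.Str.replace (PySem.Str.replace (PySem.Str.lower s) " " "") "-" "") "_" ""

-- first exact-match scan of A
def pvExactScan (nid : String) : List (List (String × String)) → Option (List (String × String))
  | [] => none
  | obj :: rest =>
    if pvNorm (PySem.Dict.getD (PySem.Dict.ofList obj) "id" "") = nid then some obj else pvExactScan nid rest

-- second fuzzy-match scan of A
def pvFuzzyScan (nid : String) : List (List (String × String)) → Option (List (String × String))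
  | [] => none
  | obj :: rest =>
    let rid := pvNorm (PySem.Dict.getD (PySem.Dict.ofList obj) "id" "")
    if PySem.Str.startswith rid nid || PySem.Str.startswith nid rid then some obj
    else pvFuzzyScan nid rest

def find_object_by_id (obj_id : String) (objects : List (List (String × String))) : Option (List (String × String)) :=
  let norm_id := pvNorm obj_id
  match pvExactScan norm_id objects with
  | some obj => some obj
  | none => pvFuzzyScan norm_id objects

-- ===== PORT B =====
-- B's single loop carrying the remembered fuzzy fallback
def pvLoop (nid : String) (fuzzy : Option (List (String × String))) :
    List (List (String × String)) → Option (List (String × String))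
  | [] => fuzzy
  | obj :: rest =>
    let rid := pvNorm (PySem.Dict.getD (PySem.Dict.ofList obj) "id" "")
    if rid = nid then some obj
    else
      pvLoop nid
        (if fuzzy.isNone && (PySem.Str.startswith rid nid || PySem.Str.startswith nid rid)
         then some obj else fuzzy) rest

def find_object_by_id_alt (obj_id : String) (objects : List (List (String × String))) : Option (List (String × String)) :=
  pvLoop (pvNorm obj_id) none objects

-- ===== PRECONDITION & SPEC =====
def Spec_find_object_by_id (obj_id : String) (objects : List (List (String × String))) (out : Option (List (String × String))) : Prop := out = find_object_by_id_alt obj_id objects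
instance (obj_id : String) (objects : List (List (String × String))) (out : Option (List (String × String))) : Decidable (Spec_find_object_by_id obj_id objects out) := by unfold Spec_find_object_by_id; infer_instance

-- ===== CLAIM (what is proved, stated in full; the proofs are below) =====
def Claim_equal_find_object_by_id : Prop := ∀ (obj_id : String) (objects : List (List (String × String))), Dom_find_object_by_id obj_id objects → Spec_find_object_by_id obj_id objects (find_object_by_id obj_id objects)

-- ===== LEMMAS AND PROOFS =====
-- B's fused loop equals: first exact match, else the carried fallback, else the first fuzzy match.
lemma pvLoop_eq (nid : String) (fz : Option (List (String × String)))
    (xs : List (List (String × String))) :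
    pvLoop nid fz xs =
      match pvExactScan nid xs with
      | some o => some o
      | none => fz.or (pvFuzzyScan nid xs) := by
  induction xs generalizing fz with
  | nil => cases fz <;> simp [pvLoop, pvExactScan, pvFuzzyScan]
  | cons obj rest ih =>
    by_cases h : pvNorm (PySem.Dict.getD (PySem.Dict.ofList obj) "id" "") = nid
    · simp [pvLoop, pvExactScan, h]
    · cases fz <;>
        simp [pvLoop, pvExactScan, pvFuzzyScan, h, ih] <;>
        cases hE : pvExactScan nid rest <;> simp [hE] <;> split_ifs <;> simp

-- ===== VERDICT (by name: the statement is the Claim_ definition above) =====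
theorem find_object_by_id_spec : Claim_equal_find_object_by_id := by
  intro obj_id objects _
  unfold Spec_find_object_by_id find_object_by_id find_object_by_id_alt
  rw [pvLoop_eq]
  cases h : pvExactScan (pvNorm obj_id) objects <;> simp [h]
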